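-- pv_equiv track=rewrite | github.com/manchos/18_price_format | format_price.py | get_format_before_dot_str
-- ===== SOURCE A (Python) =====
-- def get_format_before_dot_str(before_dot_str, digits_amount_in_part=3):
--     length = len(before_dot_str)
--     if length > digits_amount_in_part:
--         parts = len(before_dot_str) // digits_amount_in_part
--         parts_list = list(range(parts + 1))
--         for part in parts_list:
--             parts_list[parts] = before_dot_str[length - digits_amount_in_part:length]
--             parts = parts - 1
--             if parts != 0:
--                 length = length - digits_amount_in_part
--         parts_list[0] = before_dot_str[:length]
--         return ' '.join(parts_list)
--     else:
--         return before_dot_str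
-- ===== SOURCE B (Python) =====
-- def get_format_before_dot_str(before_dot_str, digits_amount_in_part=3):
--     length = len(before_dot_str)
--     if length <= digits_amount_in_part:
--         return before_dot_str
--     r = length % digits_amount_in_part
--     groups = [before_dot_str[:r]]
--     for i in range(r, length, digits_amount_in_part):
--         groups.append(before_dot_str[i:i + digits_amount_in_part])
--     return ' '.join(groups)
-- ===== Notes on version B (the rewrite author's own statement) =====
-- stated objective: simpler
-- what changed: Replaces A's right-to-left loop that decrements two counters while overwriting slots of a pre-built list(range(...)) (plus a final index-0 overwrite) with a single forward pass: compute the leading remainder r = length % digits_amount_in_part, emit before_dot_str[:r] and then the fixed-size chunks left to right, and join; A's leading-empty-group on exact multiples falls out naturally from r == 0.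
-- outside the precondition, e.g. on get_format_before_dot_str('', -3): A returns '', B returns ''
import Mathlib
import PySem

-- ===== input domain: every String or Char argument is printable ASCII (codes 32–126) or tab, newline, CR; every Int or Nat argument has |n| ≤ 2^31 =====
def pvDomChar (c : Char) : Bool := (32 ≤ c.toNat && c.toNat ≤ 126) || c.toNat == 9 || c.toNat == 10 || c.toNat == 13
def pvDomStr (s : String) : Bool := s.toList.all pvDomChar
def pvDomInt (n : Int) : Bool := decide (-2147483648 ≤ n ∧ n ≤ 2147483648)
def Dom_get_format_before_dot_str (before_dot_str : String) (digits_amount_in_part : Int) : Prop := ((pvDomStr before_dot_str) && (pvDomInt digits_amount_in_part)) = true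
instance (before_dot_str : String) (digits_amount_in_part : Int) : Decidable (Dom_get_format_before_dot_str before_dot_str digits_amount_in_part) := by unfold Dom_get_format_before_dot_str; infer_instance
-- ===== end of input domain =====

-- B replaces A's right-to-left two-counter loop over a preallocated list with one forward
-- pass keyed off the leading remainder (objective: simpler).

-- ===== PORT A =====
-- the 'for part in parts_list' loop: fuel = the (fixed) list length; state (parts_list, parts, length).
-- parts_list[parts] with parts provably ≥ 0 on Pre_; indexed assignment is List.set.
def pvALoop (s : String) (d : Int) : Nat → List String → Int → Int → List String × Int × Int
  | 0, lst, parts, length => (lst, parts, length)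
  | n + 1, lst, parts, length =>
      let lst' := lst.set parts.toNat (PySem.Str.slice s (some (length - d)) (some length))
      let parts' := parts - 1
      pvALoop s d n lst' parts' (if parts' ≠ 0 then length - d else length)

def get_format_before_dot_str (before_dot_str : String) (digits_amount_in_part : Int) : String :=
  let length := PySem.Str.len before_dot_str
  if digits_amount_in_part < length then
    let parts := PySem.Int.floordiv (PySem.Str.len before_dot_str) digits_amount_in_part
    -- list(range(parts + 1)): int placeholders; every slot is overwritten before the join reads it
    let parts_list := (PySem.List.pyRange 0 (parts + 1) 1).map (fun _ => "")
    let st := pvALoop before_dot_str digits_amount_in_part parts_list.length parts_list parts length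
    PySem.Str.join " " (st.1.set 0 (PySem.Str.slice before_dot_str none (some st.2.2)))
  else before_dot_str

-- ===== PORT B =====
def get_format_before_dot_str_alt (before_dot_str : String) (digits_amount_in_part : Int) : String :=
  let length := PySem.Str.len before_dot_str
  if length ≤ digits_amount_in_part then before_dot_str
  else
    let r := PySem.Int.mod length digits_amount_in_part
    let groups := (PySem.List.pyRange r length digits_amount_in_part).foldl
      (fun gs i => gs ++ [PySem.Str.slice before_dot_str (some i) (some (i + digits_amount_in_part))])
      [PySem.Str.slice before_dot_str none (some r)]
    PySem.Str.join " " groups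

-- ===== PRECONDITION & SPEC =====
-- Pre_ excludes digits_amount_in_part < 1 with a longer string, where A raises ZeroDivisionError
-- (= 0) or IndexError (< 0); the empty string with negative digits_amount_in_part also falls
-- outside Pre_ although both programs return the empty string there (degenerate corner, not claimed).
def Pre_get_format_before_dot_str (before_dot_str : String) (digits_amount_in_part : Int) : Prop :=
  PySem.Str.len before_dot_str ≤ digits_amount_in_part ∨ 1 ≤ digits_amount_in_part
instance (before_dot_str : String) (digits_amount_in_part : Int) : Decidable (Pre_get_format_before_dot_str before_dot_str digits_amount_in_part) := by unfold Pre_get_format_before_dot_str; infer_instance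

def pvWitness_get_format_before_dot_str : String × Int := ("1234567", 3)

def Spec_get_format_before_dot_str (before_dot_str : String) (digits_amount_in_part : Int) (out : String) : Prop := out = get_format_before_dot_str_alt before_dot_str digits_amount_in_part
instance (before_dot_str : String) (digits_amount_in_part : Int) (out : String) : Decidable (Spec_get_format_before_dot_str before_dot_str digits_amount_in_part out) := by unfold Spec_get_format_before_dot_str; infer_instance

-- ===== CLAIM (what is proved, stated in full; the proofs are below) =====
def Claim_equal_get_format_before_dot_str : Prop := ∀ (before_dot_str : String) (digits_amount_in_part : Int), Dom_get_format_before_dot_str before_dot_str digits_amount_in_part → Pre_get_format_before_dot_str before_dot_str digits_amount_in_part → Spec_get_format_before_dot_str before_dot_str digits_amount_in_part (get_format_before_dot_str before_dot_str digits_amount_in_part)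

-- ===== LEMMAS AND PROOFS =====

theorem pv_drop_set_self {α : Type} (l : List α) (i : Nat) (a : α) (h : i < l.length) :
    (l.set i a).drop i = a :: l.drop (i + 1) := by
  induction l generalizing i with
  | nil => simp at h
  | cons x xs ih =>
      cases i with
      | zero => simp
      | succ j =>
          simp only [List.set, List.drop]
          exact ih j (by simpa using h)

theorem pv_slice_congr (s : String) {a b a' b' : Int} (h1 : a = a') (h2 : b = b') :
    PySem.Str.slice s (some a) (some b) = PySem.Str.slice s (some a') (some b') := by
  rw [h1, h2]

-- the A-loop in closed form: run with fuel p+1 from parts = p, it fills slots p, p-1, …, 0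
-- with the right-to-left chunks (slot 0 temporarily getting the same chunk as slot 1)
theorem pvALoop_closed (s : String) (d : Int) :
    ∀ (p : Nat), 1 ≤ p → ∀ (lst : List String) (ℓ : Int), p + 1 ≤ lst.length →
    pvALoop s d (p + 1) lst (p : Int) ℓ =
      ((List.range (p + 1)).map (fun (k : Nat) =>
          if k = 0 then PySem.Str.slice s (some (ℓ - (p : Int) * d)) (some (ℓ - ((p : Int) - 1) * d))
          else PySem.Str.slice s (some (ℓ - ((p : Int) - (k : Int) + 1) * d)) (some (ℓ - ((p : Int) - (k : Int)) * d)))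
        ++ lst.drop (p + 1), (-1, ℓ - (p : Int) * d)) := by
  intro p hp
  induction p, hp using Nat.le_induction with
  | base =>
      intro lst ℓ hlen
      match lst, hlen with
      | a :: b :: t, _ =>
        show pvALoop s d 2 (a :: b :: t) 1 ℓ = _
        simp [pvALoop, List.range_succ, List.set]
  | succ p hp ih =>
      intro lst ℓ hlen
      have hstep : pvALoop s d (p + 1 + 1) lst ((p : Int) + 1) ℓ =
          pvALoop s d (p + 1) (lst.set (p + 1) (PySem.Str.slice s (some (ℓ - d)) (some ℓ))) (p : Int) (ℓ - d) := by
        show pvALoop s d (p + 2) lst ((p : Int) + 1) ℓ = _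
        simp only [pvALoop]
        have h1 : ((p : Int) + 1).toNat = p + 1 := by omega
        have h2 : ((p : Int) + 1 - 1) = (p : Int) := by ring
        have h3 : (p : Int) ≠ 0 := by omega
        rw [h1, h2, if_pos h3]
      have hlen' : p + 1 ≤ (lst.set (p + 1) (PySem.Str.slice s (some (ℓ - d)) (some ℓ))).length := by
        simp; omega
      have hdrop : (lst.set (p + 1) (PySem.Str.slice s (some (ℓ - d)) (some ℓ))).drop (p + 1) =
          PySem.Str.slice s (some (ℓ - d)) (some ℓ) :: lst.drop (p + 2) := by
        have := pv_drop_set_self lst (p + 1) (PySem.Str.slice s (some (ℓ - d)) (some ℓ)) (by omega)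
        simpa using this
      rw [show ((p + 1 : Nat) : Int) = (p : Int) + 1 by push_cast; ring] at *
      rw [hstep, ih _ _ hlen', hdrop]
      simp only [Prod.mk.injEq]
      refine ⟨?_, trivial, by ring⟩
      rw [List.range_succ (n := p + 1), List.map_append]
      simp only [List.map_cons, List.map_nil]
      rw [List.append_assoc]
      congr 1
      · apply List.map_congr_left
        intro k hk
        by_cases hk0 : k = 0
        · subst hk0
          rw [if_pos rfl, if_pos rfl]
          exact pv_slice_congr s (by ring) (by ring)
        · rw [if_neg hk0, if_neg hk0]
          exact pv_slice_congr s (by ring) (by ring)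
      · rw [if_neg (by omega : ¬ (p + 1 = 0)), List.singleton_append]
        congr 1
        exact pv_slice_congr s (by push_cast; ring) (by push_cast; ring)
-- end pvALoop_closed

theorem pv_foldl_append_map {α β : Type} (f : α → β) (l : List α) (acc : List β) :
    l.foldl (fun gs i => gs ++ [f i]) acc = acc ++ l.map f := by
  induction l generalizing acc with
  | nil => simp
  | cons x xs ih => simp [ih, List.append_assoc]

-- ===== VERDICT (by name: the statement is the Claim_ definition above) =====
theorem get_format_before_dot_str_spec : Claim_equal_get_format_before_dot_str := by
  intro s d _ hpre
  unfold Spec_get_format_before_dot_str get_format_before_dot_str get_format_before_dot_str_alt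
  simp only []
  set n := PySem.Str.len s with hn
  by_cases hle : n ≤ d
  · rw [if_neg (by omega), if_pos hle]
  · have hdn : d < n := by omega
    have hd1 : 1 ≤ d := by
      rcases hpre with h | h
      · omega
      · exact h
    rw [if_pos hdn, if_neg hle]
    have hn0 : 0 ≤ n := by
      rw [hn, PySem.Str.len_eq]; positivity
    -- abbreviations
    have hfd : PySem.Int.floordiv n d = n / d := PySem.Int.floordiv_eq_ediv_of_pos (by omega)
    have hmd : PySem.Int.mod n d = n % d := PySem.Int.mod_eq_emod_of_pos (by omega)
    set p : Int := n / d with hpdef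
    set r : Int := n % d with hrdef
    have hp1 : 1 ≤ p := by
      rw [hpdef]
      exact Int.le_ediv_iff_mul_le (by omega) |>.mpr (by omega)
    have hnpr : d * p + r = n := Int.ediv_add_emod n d
    have hr0 : 0 ≤ r := Int.emod_nonneg n (by omega)
    have hrd : r < d := Int.emod_lt_of_pos n (by omega)
    set P : Nat := p.toNat with hPdef
    have hPc : (P : Int) = p := Int.toNat_of_nonneg (by omega)
    have hP1 : 1 ≤ P := by omega
    have hFP : PySem.Int.floordiv n d = (P : Int) := by rw [hfd, hPc]
    rw [hFP]
    -- A side: the placeholder list has length P + 1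
    have hlistlen : (((PySem.List.pyRange 0 ((P : Int) + 1) 1).map
        (fun _ => "")).length) = P + 1 := by
      rw [List.length_map, PySem.List.length_pyRange_one]
      omega
    rw [hlistlen]
    rw [pvALoop_closed s d P hP1 _ n (by rw [hlistlen])]
    -- the A-side list, simplified
    have hdropnil : (((PySem.List.pyRange 0 ((P : Int) + 1) 1).map (fun _ => "")).drop (P + 1)) = [] := by
      apply List.drop_eq_nil_of_le
      rw [List.length_map, PySem.List.length_pyRange_one]
      omega
    rw [hdropnil, List.append_nil]
    simp only []
    have hrlen : n - (P : Int) * d = r := by rw [hPc]; linarith [hnpr]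
    rw [hrlen, hmd]
    -- expand the range map: head is the slot-0 placeholder chunk, overwritten by set 0
    rw [List.range_succ_eq_map, List.map_cons, List.set_cons_zero]
    -- B side: the foldl is an append of the mapped chunks
    rw [pv_foldl_append_map]
    rw [List.singleton_append]
    -- the chunk range of B has exactly P elements
    have hC : PySem.List.pyRange r n d = (List.range P).map (fun (k : Nat) => r + d * (k : Int)) := by
      have hcnt : (if r < n then ((n - r + d - 1) / d).toNat else 0) = P := by
        rw [if_pos (by omega : r < n)]
        have h1 : n - r + d - 1 = (d - 1) + d * p := by omega
        rw [h1, Int.add_mul_ediv_left _ _ (by omega : d ≠ 0),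
          Int.ediv_eq_zero_of_lt (by omega) (by omega), hPdef]
        omega
      rw [PySem.List.pyRange_of_pos r n (by omega), hcnt]
    rw [hC]
    simp only [List.map_map]
    congr 1
    congr 1
    apply List.map_congr_left
    intro k hk
    simp only [List.mem_range] at hk
    simp only [Function.comp, Nat.succ_eq_add_one]
    rw [if_neg (by omega : ¬ (k + 1 = 0))]
    apply pv_slice_congr
    · rw [hPc]; push_cast; linear_combination -hnpr
    · rw [hPc]; push_cast; linear_combination -hnpr
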